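-- pv_equiv track=rewrite | github.com/ed-donner/llm_engineering | community-contributions/mideseniordev/week5/scrapper.py | _has_spa_indicators
-- ===== SOURCE A (Python) =====
-- def _has_spa_indicators(html: str) -> bool:
--     """Check for common SPA/JS framework indicators in raw HTML."""
--     lower = html.lower()
--     patterns = [
--         'id="root"',
--         'id="app"',
--         'id=\'root\'',
--         'id=\'app\'',
--         "__next_data__",
--         "data-reactroot",
--         "ng-version",
--         "v-cloak",
--         "vue-app",
--         "react-root",
--     ]
--     return any(p in lower for p in patterns)
-- ===== SOURCE B (Python) =====
-- def _has_spa_indicators(html: str) -> bool: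
--     """Single left-to-right scan over the lowercased HTML: at each position,
--     test whether any indicator pattern begins there."""
--     patterns = ('id="root"', 'id="app"', "id='root'", "id='app'",
--                 "__next_data__", "data-reactroot", "ng-version", "v-cloak",
--                 "vue-app", "react-root")
--     lower = html.lower()
--     for i in range(len(lower) + 1):
--         if any(lower.startswith(p, i) for p in patterns):
--             return True
--     return False
-- ===== Notes on version B (the rewrite author's own statement) =====
-- stated objective: alternative
-- what changed: Replaces ten independent full substring scans ('p in lower' per pattern) by one left-to-right scan over positions of the lowercased HTML, testing at each position whether any pattern starts there and returning at the first hit.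
import Mathlib
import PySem

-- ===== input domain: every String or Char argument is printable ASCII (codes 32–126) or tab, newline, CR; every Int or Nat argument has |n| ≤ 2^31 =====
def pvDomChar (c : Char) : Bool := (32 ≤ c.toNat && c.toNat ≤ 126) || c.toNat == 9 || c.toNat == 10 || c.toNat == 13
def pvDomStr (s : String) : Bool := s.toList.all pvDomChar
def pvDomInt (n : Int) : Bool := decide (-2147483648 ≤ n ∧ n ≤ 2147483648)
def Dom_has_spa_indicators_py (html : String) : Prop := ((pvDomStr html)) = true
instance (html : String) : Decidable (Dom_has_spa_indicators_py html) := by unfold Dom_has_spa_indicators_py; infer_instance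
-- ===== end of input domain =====

-- B replaces A's ten sequential whole-text substring scans by one left-to-right
-- scan over positions testing each pattern as a prefix there (alternative, not faster).

-- ===== PORT A =====
def has_spa_indicators_py (html : String) : Bool :=
  let lower := PySem.Str.lower html
  let patterns : List String :=
    ["id=\"root\"", "id=\"app\"", "id='root'", "id='app'", "__next_data__",
     "data-reactroot", "ng-version", "v-cloak", "vue-app", "react-root"]
  patterns.any (fun p => PySem.Str.isIn p lower)

-- ===== PORT B =====
def pvPatterns_alt : List String :=
  ["id=\"root\"", "id=\"app\"", "id='root'", "id='app'", "__next_data__",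
   "data-reactroot", "ng-version", "v-cloak", "vue-app", "react-root"]

-- B's position loop: 'for i in range(len(lower)+1): if any(lower.startswith(p, i)): return True',
-- transcribed as structural recursion over the suffix starting at position i
-- (lower.startswith(p, i) = p.toList.isPrefixOf (suffix at i)).
def pvScan_alt (pats : List String) : List Char → Bool
  | [] => pats.any (fun p => p.toList.isPrefixOf ([] : List Char))
  | c :: t =>
    if pats.any (fun p => p.toList.isPrefixOf (c :: t)) then true
    else pvScan_alt pats t

def has_spa_indicators_py_alt (html : String) : Bool :=
  pvScan_alt pvPatterns_alt (PySem.Str.lower html).toList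

-- ===== PRECONDITION & SPEC =====
def Spec_has_spa_indicators_py (html : String) (out : Bool) : Prop := out = has_spa_indicators_py_alt html
instance (html : String) (out : Bool) : Decidable (Spec_has_spa_indicators_py html out) := by unfold Spec_has_spa_indicators_py; infer_instance

-- ===== CLAIM (what is proved, stated in full; the proofs are below) =====
def Claim_equal_has_spa_indicators_py : Prop := ∀ (html : String), Dom_has_spa_indicators_py html → Spec_has_spa_indicators_py html (has_spa_indicators_py html)

-- ===== LEMMAS AND PROOFS =====

-- B's position scan finds exactly the patterns occurring as an infix of the text.
lemma pvPrefixOf_nil (p : String) :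
    (p.toList.isPrefixOf ([] : List Char)) = decide (p = "") := by
  cases hp : p.toList with
  | nil => simp [List.isPrefixOf, show p = "" from by cases p; simpa using hp]
  | cons c t => simp [List.isPrefixOf, show p ≠ "" from by intro h; subst h; simp at hp]

lemma pvScan_alt_eq (pats : List String) (s : List Char) :
    pvScan_alt pats s = pats.any (fun p => decide (p.toList <:+: s)) := by
  induction s with
  | nil =>
    simp only [pvScan_alt, List.infix_nil]
    refine PySem.List.any_congr_mem (fun p _ => ?_)
    rw [pvPrefixOf_nil]
    refine decide_eq_decide.mpr ⟨fun h => by subst h; rfl, fun h => ?_⟩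
    have h2 := congrArg String.ofList h
    rwa [String.ofList_toList] at h2
  | cons c t ih =>
    by_cases h : pats.any (fun p => p.toList.isPrefixOf (c :: t))
    · simp only [pvScan_alt, h, if_true]
      rcases List.any_eq_true.mp h with ⟨p, hp, hpre⟩
      exact (List.any_eq_true.mpr ⟨p, hp,
        decide_eq_true ((List.isPrefixOf_iff_prefix.mp hpre).isInfix)⟩).symm
    · simp only [pvScan_alt, h, ih]
      refine PySem.List.any_congr_mem (fun p hp => ?_)
      have hnp : ¬ (p.toList <+: c :: t) := fun hpre =>
        h (List.any_eq_true.mpr ⟨p, hp, List.isPrefixOf_iff_prefix.mpr hpre⟩)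
      exact decide_eq_decide.mpr ⟨fun ht => List.infix_cons_iff.mpr (Or.inr ht),
        fun hc => (List.infix_cons_iff.mp hc).resolve_left hnp⟩

theorem has_spa_indicators_py_spec : Claim_equal_has_spa_indicators_py := by
  intro html _
  unfold Spec_has_spa_indicators_py has_spa_indicators_py has_spa_indicators_py_alt
  rw [pvScan_alt_eq]
  refine PySem.List.any_congr_mem (fun p _ => ?_)
  simp only [PySem.Str.isIn, PySem.Str.toList_lower]
  by_cases h : p.toList <:+: PySem.Chars.lower html.toList
  · rw [(PySem.Chars.isIn_iff_infix p.toList (PySem.Chars.lower html.toList)).mpr h]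
    simp [h]
  · rw [(PySem.Chars.isIn_eq_false_iff p.toList (PySem.Chars.lower html.toList)).mpr h]
    simp [h]
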